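-- pv_equiv track=rewrite | github.com/Praneeth1136/LeetSync | scraper.py | map_tags_to_taxonomy
-- ===== SOURCE A (Python) =====
-- def map_tags_to_taxonomy(tags_list):
--     tags = [tag['name'] for tag in tags_list]
--
--     if "Array" in tags:
--         if "Two Pointers" in tags: return ("Array", "Two Pointer")
--         if "Sliding Window" in tags: return ("Array", "Sliding Window")
--         if "Prefix Sum" in tags: return ("Array", "Prefix Based")
--         if "Binary Search" in tags: return ("Array", "Binary Search")
--         return ("Array", "Kadane's / Subarray")
--     if "String" in tags:
--         if "Sliding Window" in tags: return ("String", "Sliding Window")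
--         if "Two Pointers" in tags: return ("String", "Two Pointers")
--         return ("String", "Pattern Matching")
--     if "Hash Table" in tags:
--         return ("Hash map", "Frequency Based")
--     if "Stack" in tags:
--         if "Monotonic Stack" in tags: return ("Stack", "Monotonic Stack")
--         return ("Stack", "Expression Handling")
--     if "Queue" in tags or "Deque" in tags:
--         return ("Queue / Deque", "FIFO Processing")
--     if "Linked List" in tags:
--         if "Two Pointers" in tags: return ("Linked List", "Pointer Techniques")
--         return ("Linked List", "Reversal")
--     if "Tree" in tags or "Binary Tree" in tags:
--         if "Binary Search Tree" in tags: return ("Trees", "BST")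
--         if "Depth-First Search" in tags: return ("Trees", "Traversal")
--         return ("Trees", "Recursion Patterns")
--     if "Recursion" in tags or "Backtracking" in tags:
--         return ("Recursion", "Backtracking")
--     if "Heap (Priority Queue)" in tags:
--         return ("Heap", "Top K")
--     if "Graph" in tags:
--         if "Breadth-First Search" in tags or "Depth-First Search" in tags: return ("Graphs", "Traversal")
--         if "Topological Sort" in tags: return ("Graphs", "Topological Sort")
--         if "Shortest Path" in tags: return ("Graphs", "Shortest Path")
--         return ("Graphs", "Cycle Detection")
--     if "Trie" in tags:
--         return ("Trie", "Prefix Based")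
--     if "Dynamic Programming" in tags:
--         return ("Dynamic Programming", "Core")
--     if "Greedy" in tags:
--         return ("Greedy", "Interval Greedy")
--     if "Bit Manipulation" in tags:
--         return ("Bit Manipulation", "Core")
--     if "Sorting" in tags:
--         return ("Sorting Algorithms", "Merge Sort")
--     if "Segment Tree" in tags or "Binary Indexed Tree" in tags:
--         return ("Range Structures", "Segment Tree")
--
--     return ("Array", "Two Pointer")
-- ===== SOURCE B (Python) =====
-- _RULES = [
--     (["Array", "Two Pointers"], [], ("Array", "Two Pointer")),
--     (["Array", "Sliding Window"], [], ("Array", "Sliding Window")),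
--     (["Array", "Prefix Sum"], [], ("Array", "Prefix Based")),
--     (["Array", "Binary Search"], [], ("Array", "Binary Search")),
--     (["Array"], [], ("Array", "Kadane's / Subarray")),
--     (["String", "Sliding Window"], [], ("String", "Sliding Window")),
--     (["String", "Two Pointers"], [], ("String", "Two Pointers")),
--     (["String"], [], ("String", "Pattern Matching")),
--     (["Hash Table"], [], ("Hash map", "Frequency Based")),
--     (["Stack", "Monotonic Stack"], [], ("Stack", "Monotonic Stack")),
--     (["Stack"], [], ("Stack", "Expression Handling")),
--     ([], ["Queue", "Deque"], ("Queue / Deque", "FIFO Processing")),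
--     (["Linked List", "Two Pointers"], [], ("Linked List", "Pointer Techniques")),
--     (["Linked List"], [], ("Linked List", "Reversal")),
--     (["Binary Search Tree"], ["Tree", "Binary Tree"], ("Trees", "BST")),
--     (["Depth-First Search"], ["Tree", "Binary Tree"], ("Trees", "Traversal")),
--     ([], ["Tree", "Binary Tree"], ("Trees", "Recursion Patterns")),
--     ([], ["Recursion", "Backtracking"], ("Recursion", "Backtracking")),
--     (["Heap (Priority Queue)"], [], ("Heap", "Top K")),
--     (["Graph"], ["Breadth-First Search", "Depth-First Search"], ("Graphs", "Traversal")),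
--     (["Graph", "Topological Sort"], [], ("Graphs", "Topological Sort")),
--     (["Graph", "Shortest Path"], [], ("Graphs", "Shortest Path")),
--     (["Graph"], [], ("Graphs", "Cycle Detection")),
--     (["Trie"], [], ("Trie", "Prefix Based")),
--     (["Dynamic Programming"], [], ("Dynamic Programming", "Core")),
--     (["Greedy"], [], ("Greedy", "Interval Greedy")),
--     (["Bit Manipulation"], [], ("Bit Manipulation", "Core")),
--     (["Sorting"], [], ("Sorting Algorithms", "Merge Sort")),
--     ([], ["Segment Tree", "Binary Indexed Tree"], ("Range Structures", "Segment Tree")),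
-- ]
--
--
-- def map_tags_to_taxonomy(tags_list):
--     names = {tag['name'] for tag in tags_list}
--     for musts, anyof, result in _RULES:
--         if all(m in names for m in musts) and (not anyof or any(a in names for a in anyof)):
--             return result
--     return ("Array", "Two Pointer")
-- ===== Notes on version B (the rewrite author's own statement) =====
-- stated objective: idiomatic
-- what changed: Replaces the hard-coded nested if/return chain with a set of tag names plus a declarative ordered rule table of (all-of, any-of, result) triples scanned for the first match, with each category's default placed as a rule so the nested priority is preserved.
import Mathlib
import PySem

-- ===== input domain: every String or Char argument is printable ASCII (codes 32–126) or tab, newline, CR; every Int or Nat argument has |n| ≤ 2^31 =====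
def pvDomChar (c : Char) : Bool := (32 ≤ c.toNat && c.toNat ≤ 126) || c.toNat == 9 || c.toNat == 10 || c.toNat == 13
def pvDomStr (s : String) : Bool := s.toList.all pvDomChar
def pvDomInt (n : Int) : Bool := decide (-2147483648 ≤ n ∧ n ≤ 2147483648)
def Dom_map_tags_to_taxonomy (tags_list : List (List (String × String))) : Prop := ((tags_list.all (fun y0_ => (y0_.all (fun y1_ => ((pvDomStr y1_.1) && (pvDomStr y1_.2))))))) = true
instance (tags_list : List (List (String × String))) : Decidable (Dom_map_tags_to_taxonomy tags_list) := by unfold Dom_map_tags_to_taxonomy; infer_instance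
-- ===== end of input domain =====

-- B replaces A's nested if/return chain with a tag-name set scanned against an ordered declarative rule table (idiomatic; same behaviour, not claimed faster).


-- ===== PORT A =====
-- tag['name']: exact under Pre_ (every tag dict has a "name" key, so the .getD "" default is never taken)
def pvNameA (t : List (String × String)) : String := ((PySem.Dict.mk t).get? "name").getD ""

def map_tags_to_taxonomy (tags_list : List (List (String × String))) : String × String :=
  let tags := tags_list.map pvNameA
  if tags.contains "Array" then
    if tags.contains "Two Pointers" then ("Array", "Two Pointer")
    else if tags.contains "Sliding Window" then ("Array", "Sliding Window")
    else if tags.contains "Prefix Sum" then ("Array", "Prefix Based")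
    else if tags.contains "Binary Search" then ("Array", "Binary Search")
    else ("Array", "Kadane's / Subarray")
  else if tags.contains "String" then
    if tags.contains "Sliding Window" then ("String", "Sliding Window")
    else if tags.contains "Two Pointers" then ("String", "Two Pointers")
    else ("String", "Pattern Matching")
  else if tags.contains "Hash Table" then ("Hash map", "Frequency Based")
  else if tags.contains "Stack" then
    if tags.contains "Monotonic Stack" then ("Stack", "Monotonic Stack")
    else ("Stack", "Expression Handling")
  else if tags.contains "Queue" || tags.contains "Deque" then ("Queue / Deque", "FIFO Processing")
  else if tags.contains "Linked List" then
    if tags.contains "Two Pointers" then ("Linked List", "Pointer Techniques")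
    else ("Linked List", "Reversal")
  else if tags.contains "Tree" || tags.contains "Binary Tree" then
    if tags.contains "Binary Search Tree" then ("Trees", "BST")
    else if tags.contains "Depth-First Search" then ("Trees", "Traversal")
    else ("Trees", "Recursion Patterns")
  else if tags.contains "Recursion" || tags.contains "Backtracking" then ("Recursion", "Backtracking")
  else if tags.contains "Heap (Priority Queue)" then ("Heap", "Top K")
  else if tags.contains "Graph" then
    if tags.contains "Breadth-First Search" || tags.contains "Depth-First Search" then ("Graphs", "Traversal")
    else if tags.contains "Topological Sort" then ("Graphs", "Topological Sort")
    else if tags.contains "Shortest Path" then ("Graphs", "Shortest Path")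
    else ("Graphs", "Cycle Detection")
  else if tags.contains "Trie" then ("Trie", "Prefix Based")
  else if tags.contains "Dynamic Programming" then ("Dynamic Programming", "Core")
  else if tags.contains "Greedy" then ("Greedy", "Interval Greedy")
  else if tags.contains "Bit Manipulation" then ("Bit Manipulation", "Core")
  else if tags.contains "Sorting" then ("Sorting Algorithms", "Merge Sort")
  else if tags.contains "Segment Tree" || tags.contains "Binary Indexed Tree" then ("Range Structures", "Segment Tree")
  else ("Array", "Two Pointer")

-- ===== PORT B =====
def pvRules : List (List String × List String × (String × String)) :=
  [ (["Array", "Two Pointers"], [], ("Array", "Two Pointer")),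
    (["Array", "Sliding Window"], [], ("Array", "Sliding Window")),
    (["Array", "Prefix Sum"], [], ("Array", "Prefix Based")),
    (["Array", "Binary Search"], [], ("Array", "Binary Search")),
    (["Array"], [], ("Array", "Kadane's / Subarray")),
    (["String", "Sliding Window"], [], ("String", "Sliding Window")),
    (["String", "Two Pointers"], [], ("String", "Two Pointers")),
    (["String"], [], ("String", "Pattern Matching")),
    (["Hash Table"], [], ("Hash map", "Frequency Based")),
    (["Stack", "Monotonic Stack"], [], ("Stack", "Monotonic Stack")),
    (["Stack"], [], ("Stack", "Expression Handling")),
    ([], ["Queue", "Deque"], ("Queue / Deque", "FIFO Processing")),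
    (["Linked List", "Two Pointers"], [], ("Linked List", "Pointer Techniques")),
    (["Linked List"], [], ("Linked List", "Reversal")),
    (["Binary Search Tree"], ["Tree", "Binary Tree"], ("Trees", "BST")),
    (["Depth-First Search"], ["Tree", "Binary Tree"], ("Trees", "Traversal")),
    ([], ["Tree", "Binary Tree"], ("Trees", "Recursion Patterns")),
    ([], ["Recursion", "Backtracking"], ("Recursion", "Backtracking")),
    (["Heap (Priority Queue)"], [], ("Heap", "Top K")),
    (["Graph"], ["Breadth-First Search", "Depth-First Search"], ("Graphs", "Traversal")),
    (["Graph", "Topological Sort"], [], ("Graphs", "Topological Sort")),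
    (["Graph", "Shortest Path"], [], ("Graphs", "Shortest Path")),
    (["Graph"], [], ("Graphs", "Cycle Detection")),
    (["Trie"], [], ("Trie", "Prefix Based")),
    (["Dynamic Programming"], [], ("Dynamic Programming", "Core")),
    (["Greedy"], [], ("Greedy", "Interval Greedy")),
    (["Bit Manipulation"], [], ("Bit Manipulation", "Core")),
    (["Sorting"], [], ("Sorting Algorithms", "Merge Sort")),
    ([], ["Segment Tree", "Binary Indexed Tree"], ("Range Structures", "Segment Tree")) ]

-- one rule fires: all of `musts` present, and (`anyof` empty or one of them present)
def pvFires (names : PySem.Set String) (r : List String × List String × (String × String)) : Bool :=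
  r.1.all (fun m => PySem.Set.contains names m) &&
    (r.2.1.isEmpty || r.2.1.any (fun a => PySem.Set.contains names a))

def pvScan (names : PySem.Set String) : List (List String × List String × (String × String)) → String × String
  | [] => ("Array", "Two Pointer")
  | r :: rs => if pvFires names r then r.2.2 else pvScan names rs

def map_tags_to_taxonomy_alt (tags_list : List (List (String × String))) : String × String :=
  pvScan (PySem.Set.ofList (tags_list.map pvNameA)) pvRules

-- ===== PRECONDITION & SPEC =====
-- Pre_ excludes tag dicts without a "name" key, on which the Python A (and B) raise KeyError.
def Pre_map_tags_to_taxonomy (tags_list : List (List (String × String))) : Prop :=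
  ∀ t ∈ tags_list, "name" ∈ t.map Prod.fst
instance (tags_list : List (List (String × String))) : Decidable (Pre_map_tags_to_taxonomy tags_list) := by unfold Pre_map_tags_to_taxonomy; infer_instance

def pvWitness_map_tags_to_taxonomy : (List (List (String × String))) :=
  [[("name", "Array")], [("name", "Two Pointers"), ("slug", "two-pointers")]]

def Spec_map_tags_to_taxonomy (tags_list : List (List (String × String))) (out : String × String) : Prop := out = map_tags_to_taxonomy_alt tags_list
instance (tags_list : List (List (String × String))) (out : String × String) : Decidable (Spec_map_tags_to_taxonomy tags_list out) := by unfold Spec_map_tags_to_taxonomy; infer_instance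

-- ===== CLAIM (what is proved, stated in full; the proofs are below) =====
def Claim_equal_map_tags_to_taxonomy : Prop := ∀ (tags_list : List (List (String × String))), Dom_map_tags_to_taxonomy tags_list → Pre_map_tags_to_taxonomy tags_list → Spec_map_tags_to_taxonomy tags_list (map_tags_to_taxonomy tags_list)

-- ===== LEMMAS AND PROOFS =====
theorem pvContains_ofList (l : List String) (x : String) :
    PySem.Set.contains (PySem.Set.ofList l) x = l.contains x := by
  by_cases h : x ∈ l <;>
    simp [PySem.Set.mem_ofList, h]

set_option maxHeartbeats 2000000 in
theorem pvMain (l : List String) :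
    (if l.contains "Array" then
      if l.contains "Two Pointers" then ("Array", "Two Pointer")
      else if l.contains "Sliding Window" then ("Array", "Sliding Window")
      else if l.contains "Prefix Sum" then ("Array", "Prefix Based")
      else if l.contains "Binary Search" then ("Array", "Binary Search")
      else ("Array", "Kadane's / Subarray")
    else if l.contains "String" then
      if l.contains "Sliding Window" then ("String", "Sliding Window")
      else if l.contains "Two Pointers" then ("String", "Two Pointers")
      else ("String", "Pattern Matching")
    else if l.contains "Hash Table" then ("Hash map", "Frequency Based")
    else if l.contains "Stack" then
      if l.contains "Monotonic Stack" then ("Stack", "Monotonic Stack")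
      else ("Stack", "Expression Handling")
    else if l.contains "Queue" || l.contains "Deque" then ("Queue / Deque", "FIFO Processing")
    else if l.contains "Linked List" then
      if l.contains "Two Pointers" then ("Linked List", "Pointer Techniques")
      else ("Linked List", "Reversal")
    else if l.contains "Tree" || l.contains "Binary Tree" then
      if l.contains "Binary Search Tree" then ("Trees", "BST")
      else if l.contains "Depth-First Search" then ("Trees", "Traversal")
      else ("Trees", "Recursion Patterns")
    else if l.contains "Recursion" || l.contains "Backtracking" then ("Recursion", "Backtracking")
    else if l.contains "Heap (Priority Queue)" then ("Heap", "Top K")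
    else if l.contains "Graph" then
      if l.contains "Breadth-First Search" || l.contains "Depth-First Search" then ("Graphs", "Traversal")
      else if l.contains "Topological Sort" then ("Graphs", "Topological Sort")
      else if l.contains "Shortest Path" then ("Graphs", "Shortest Path")
      else ("Graphs", "Cycle Detection")
    else if l.contains "Trie" then ("Trie", "Prefix Based")
    else if l.contains "Dynamic Programming" then ("Dynamic Programming", "Core")
    else if l.contains "Greedy" then ("Greedy", "Interval Greedy")
    else if l.contains "Bit Manipulation" then ("Bit Manipulation", "Core")
    else if l.contains "Sorting" then ("Sorting Algorithms", "Merge Sort")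
    else if l.contains "Segment Tree" || l.contains "Binary Indexed Tree" then ("Range Structures", "Segment Tree")
    else ("Array", "Two Pointer")) = pvScan (PySem.Set.ofList l) pvRules := by
  simp only [pvRules, pvScan, pvFires, List.all_cons, List.all_nil, List.any_cons, List.any_nil,
    List.isEmpty_cons, List.isEmpty_nil, pvContains_ofList, Bool.and_true, Bool.or_false,
    Bool.false_or]
  generalize l.contains "Array" = b0
  generalize l.contains "Two Pointers" = b1
  generalize l.contains "Sliding Window" = b2
  generalize l.contains "Prefix Sum" = b3
  generalize l.contains "Binary Search" = b4
  generalize l.contains "String" = b5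
  generalize l.contains "Hash Table" = b6
  generalize l.contains "Stack" = b7
  generalize l.contains "Monotonic Stack" = b8
  generalize l.contains "Queue" = b9
  generalize l.contains "Deque" = b10
  generalize l.contains "Linked List" = b11
  generalize l.contains "Tree" = b12
  generalize l.contains "Binary Tree" = b13
  generalize l.contains "Binary Search Tree" = b14
  generalize l.contains "Depth-First Search" = b15
  generalize l.contains "Recursion" = b16
  generalize l.contains "Backtracking" = b17
  generalize l.contains "Heap (Priority Queue)" = b18
  generalize l.contains "Graph" = b19
  generalize l.contains "Breadth-First Search" = b20
  generalize l.contains "Topological Sort" = b21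
  generalize l.contains "Shortest Path" = b22
  generalize l.contains "Trie" = b23
  generalize l.contains "Dynamic Programming" = b24
  generalize l.contains "Greedy" = b25
  generalize l.contains "Bit Manipulation" = b26
  generalize l.contains "Sorting" = b27
  generalize l.contains "Segment Tree" = b28
  generalize l.contains "Binary Indexed Tree" = b29
  by_cases h0 : b0 = true
  · simp [h0]
  by_cases h1 : b5 = true
  · simp [h0, h1]
  by_cases h2 : b6 = true
  · simp [h0, h1, h2]
  by_cases h3 : b7 = true
  · simp [h0, h1, h2, h3]
  by_cases h4 : (b9 || b10) = true
  · simp [h0, h1, h2, h3, h4]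
  by_cases h5 : b11 = true
  · simp [h0, h1, h2, h3, h4, h5]
  by_cases h6 : (b12 || b13) = true
  · simp [h0, h1, h2, h3, h4, h5, h6]
  by_cases h7 : (b16 || b17) = true
  · simp [h0, h1, h2, h3, h4, h5, h6, h7]
  by_cases h8 : b18 = true
  · simp [h0, h1, h2, h3, h4, h5, h6, h7, h8]
  by_cases h9 : b19 = true
  · simp [h0, h1, h2, h3, h4, h5, h6, h7, h8, h9]
  by_cases h10 : b23 = true
  · simp [h0, h1, h2, h3, h4, h5, h6, h7, h8, h9, h10]
  by_cases h11 : b24 = true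
  · simp [h0, h1, h2, h3, h4, h5, h6, h7, h8, h9, h10, h11]
  by_cases h12 : b25 = true
  · simp [h0, h1, h2, h3, h4, h5, h6, h7, h8, h9, h10, h11, h12]
  by_cases h13 : b26 = true
  · simp [h0, h1, h2, h3, h4, h5, h6, h7, h8, h9, h10, h11, h12, h13]
  by_cases h14 : b27 = true
  · simp [h0, h1, h2, h3, h4, h5, h6, h7, h8, h9, h10, h11, h12, h13, h14]
  by_cases h15 : (b28 || b29) = true
  · simp [h0, h1, h2, h3, h4, h5, h6, h7, h8, h9, h10, h11, h12, h13, h14, h15]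
  simp [h0, h1, h2, h3, h4, h5, h6, h7, h8, h9, h10, h11, h12, h13, h14, h15]

-- ===== VERDICT (by name: the statement is the Claim_ definition above) =====
theorem map_tags_to_taxonomy_spec : Claim_equal_map_tags_to_taxonomy := by
  intro tags_list _ _
  unfold Spec_map_tags_to_taxonomy map_tags_to_taxonomy map_tags_to_taxonomy_alt
  exact pvMain (tags_list.map pvNameA)
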